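-- pv_equiv track=rewrite | github.com/eforgacs-games/Dragon_Warrior | src/player/player_stats.py | get_total_name_score
-- ===== SOURCE A (Python) =====
-- letter_calculations = {
--     0: (" ", "g", "w", "M", "'"),
--     1: ("h", "x", "N"),
--     2: ("i", "y", "O"),
--     3: ("j", "z", "P"),
--     4: ("k", "A", "Q"),
--     5: ("l", "B", "R"),
--     6: ("m", "C", "S"),
--     7: ("n", "D", "T", "."),
--     8: ("o", "E", "U", ","),
--     9: ("p", "F", "V", "-"),
--     10: ("a", "q", "G", "W"),
--     11: ("b", "r", "H", "X", "?"),
--     12: ("c", "s", "I", "Y", "!"),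
--     13: ("d", "t", "J", "Z"),
--     14: ("e", "u", "K", ")"),
--     15: ("f", "v", "L", "("),
-- }
--
-- def get_total_name_score(name):
--     """Gets name score based on the first four characters of the name."""
--     name = name[0:4]
--     total = 0
--     for letter in name:
--         for score, letters in letter_calculations.items():
--             if letter in letters:
--                 total += score
--                 break
--     return total
-- ===== SOURCE B (Python) =====
-- _punct_scores = {" ": 0, "'": 0, ".": 7, ",": 8, "-": 9, "?": 11, "!": 12, ")": 14, "(": 15}
--
-- def get_total_name_score(name):
--     """Gets name score based on the first four characters of the name."""
--     total = 0
--     for c in name[0:4]: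
--         if "a" <= c <= "z":
--             total += (ord(c) - ord("g")) % 16
--         elif "A" <= c <= "Z":
--             total += (ord(c) - 61) % 16
--         else:
--             total += _punct_scores.get(c, 0)
--     return total
-- ===== Notes on version B (the rewrite author's own statement) =====
-- stated objective: alternative
-- what changed: Replaces the per-character linear scan over the 16 score groups by a closed arithmetic formula on the character code: lowercase letters score (ord-103)%16, uppercase score (ord-61)%16, and only the 9 punctuation characters keep a tiny table (unknown characters add 0).
import Mathlib
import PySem

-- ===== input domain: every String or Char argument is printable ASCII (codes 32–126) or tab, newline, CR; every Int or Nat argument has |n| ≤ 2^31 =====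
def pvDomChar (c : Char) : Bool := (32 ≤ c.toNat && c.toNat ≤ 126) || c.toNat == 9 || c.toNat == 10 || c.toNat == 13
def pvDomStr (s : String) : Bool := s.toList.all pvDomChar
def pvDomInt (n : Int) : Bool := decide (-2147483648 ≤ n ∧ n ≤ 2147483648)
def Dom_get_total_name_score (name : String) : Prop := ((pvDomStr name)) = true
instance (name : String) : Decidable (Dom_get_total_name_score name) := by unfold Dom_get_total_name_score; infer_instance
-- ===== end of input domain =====

-- B replaces A's per-character scan over the 16 score groups by a closed arithmetic
-- formula on the character code (lowercase (ord-103)%16, uppercase (ord-61)%16),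
-- keeping only a 9-entry table for punctuation (objective: alternative).

-- the module-level dict letter_calculations (A's data)
def pvLetterCalculations : List (Int × List Char) :=
  [(0, [' ', 'g', 'w', 'M', '\'']),
   (1, ['h', 'x', 'N']),
   (2, ['i', 'y', 'O']),
   (3, ['j', 'z', 'P']),
   (4, ['k', 'A', 'Q']),
   (5, ['l', 'B', 'R']),
   (6, ['m', 'C', 'S']),
   (7, ['n', 'D', 'T', '.']),
   (8, ['o', 'E', 'U', ',']),
   (9, ['p', 'F', 'V', '-']),
   (10, ['a', 'q', 'G', 'W']),
   (11, ['b', 'r', 'H', 'X', '?']),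
   (12, ['c', 's', 'I', 'Y', '!']),
   (13, ['d', 't', 'J', 'Z']),
   (14, ['e', 'u', 'K', ')']),
   (15, ['f', 'v', 'L', '('])]

-- ===== PORT A =====
-- inner 'for score, letters in …: if letter in letters: total += score; break'
def pvGroupScan (c : Char) : List (Int × List Char) → Int → Int
  | [], total => total
  | (score, letters) :: rest, total =>
      if c ∈ letters then total + score else pvGroupScan c rest total

def get_total_name_score (name : String) : Int :=
  (PySem.List.slice name.toList (some 0) (some 4)).foldl
    (fun total letter => pvGroupScan letter pvLetterCalculations total) 0

-- ===== PORT B =====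
-- _punct_scores = {" ": 0, "'": 0, ".": 7, ",": 8, "-": 9, "?": 11, "!": 12, ")": 14, "(": 15}
def pvPunctScores : PySem.Dict Char Int :=
  PySem.Dict.mk [(' ', 0), ('\'', 0), ('.', 7), (',', 8), ('-', 9), ('?', 11), ('!', 12), (')', 14), ('(', 15)]

-- loop body: Python's '"a" <= c <= "z"' compares code points, ported exactly as
-- bounds on c.toNat (97..122 and 65..90); '%' is Python mod = PySem.Int.mod
def get_total_name_score_alt (name : String) : Int :=
  (PySem.List.slice name.toList (some 0) (some 4)).foldl
    (fun total c =>
      if 97 ≤ c.toNat ∧ c.toNat ≤ 122 then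
        total + PySem.Int.mod ((c.toNat : Int) - 103) 16
      else if 65 ≤ c.toNat ∧ c.toNat ≤ 90 then
        total + PySem.Int.mod ((c.toNat : Int) - 61) 16
      else
        total + pvPunctScores.getD c 0) 0

-- ===== PRECONDITION & SPEC =====
def Spec_get_total_name_score (name : String) (out : Int) : Prop := out = get_total_name_score_alt name
instance (name : String) (out : Int) : Decidable (Spec_get_total_name_score name out) := by unfold Spec_get_total_name_score; infer_instance

-- ===== CLAIM =====
def Claim_equal_get_total_name_score : Prop := ∀ (name : String), Dom_get_total_name_score name → Spec_get_total_name_score name (get_total_name_score name)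

-- ===== LEMMAS AND PROOFS =====
set_option maxRecDepth 10000

-- B's per-character score, for reasoning
def pvCharScoreB (c : Char) : Int :=
  if 97 ≤ c.toNat ∧ c.toNat ≤ 122 then PySem.Int.mod ((c.toNat : Int) - 103) 16
  else if 65 ≤ c.toNat ∧ c.toNat ≤ 90 then PySem.Int.mod ((c.toNat : Int) - 61) 16
  else pvPunctScores.getD c 0

-- the inner scan only adds to the accumulator
theorem pvGroupScan_acc (c : Char) : ∀ (L : List (Int × List Char)) (t : Int),
    pvGroupScan c L t = t + pvGroupScan c L 0 := by
  intro L
  induction L with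
  | nil => intro t; simp [pvGroupScan]
  | cons p rest ih =>
      intro t
      obtain ⟨s, letters⟩ := p
      by_cases h : c ∈ letters
      · simp [pvGroupScan, h]
      · simp only [pvGroupScan, if_neg h]
        exact ih t

-- all 61 letters of A's table (the flattening of the groups)
def pvKeyList : List Char :=
  [' ', 'g', 'w', 'M', '\'', 'h', 'x', 'N', 'i', 'y', 'O', 'j', 'z', 'P', 'k', 'A', 'Q', 'l', 'B', 'R', 'm', 'C', 'S', 'n', 'D', 'T', '.', 'o', 'E', 'U', ',', 'p', 'F', 'V', '-', 'a', 'q', 'G', 'W', 'b', 'r', 'H', 'X', '?', 'c', 's', 'I', 'Y', '!', 'd', 't', 'J', 'Z', 'e', 'u', 'K', ')', 'f', 'v', 'L', '(']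

theorem pvKeyList_eq_flatten : (pvLetterCalculations.map Prod.snd).flatten = pvKeyList := by
  decide

-- scan over groups none of which contains c leaves the accumulator unchanged
theorem pvScan_not_mem {c : Char} : ∀ (L : List (Int × List Char)) (t : Int),
    (∀ p ∈ L, c ∉ p.2) → pvGroupScan c L t = t := by
  intro L
  induction L with
  | nil => intro t _; rfl
  | cons p rest ih =>
      intro t h
      obtain ⟨s, letters⟩ := p
      have hn : c ∉ letters := h _ (List.mem_cons_self)
      simp only [pvGroupScan, if_neg hn]
      exact ih t fun q hq => h q (List.mem_cons_of_mem _ hq)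

-- lookup of an absent key in a literal dict is none
theorem pvGet?_not_mem {c : Char} : ∀ (ps : List (Char × Int)),
    c ∉ ps.map Prod.fst → (PySem.Dict.mk ps).get? c = none := by
  intro ps
  induction ps with
  | nil => intro _; rfl
  | cons p rest ih =>
      intro h
      simp only [List.map, List.mem_cons, not_or] at h
      rw [PySem.Dict.get?_mk_cons, if_neg (by simpa using fun e => h.1 e.symm)]
      exact ih h.2

-- every character in a letter range is one of the table's keys
theorem pvRange_mem_keyList {c : Char} (h1 : 65 ≤ c.toNat) (h2 : c.toNat ≤ 122) :
    c ∈ pvKeyList ∨ (90 < c.toNat ∧ c.toNat < 97) := by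
  have hc : Char.ofNat c.toNat = c := Char.ofNat_toNat c
  by_cases hm : 90 < c.toNat ∧ c.toNat < 97
  · exact Or.inr hm
  · left
    push Not at hm
    set n := c.toNat with hn
    rw [← hc]
    interval_cases n <;> first | decide | (exfalso; omega)

-- per-character agreement of scan and formula
theorem pvCharScore_eq (c : Char) :
    pvGroupScan c pvLetterCalculations 0 = pvCharScoreB c := by
  by_cases h : c ∈ pvKeyList
  · simp only [pvKeyList, List.mem_cons, List.not_mem_nil, or_false] at h
    rcases h with h|h|h|h|h|h|h|h|h|h|h|h|h|h|h|h|h|h|h|h|h|h|h|h|h|h|h|h|h|h|h|h|h|h|h|h|h|h|h|h|h|h|h|h|h|h|h|h|h|h|h|h|h|h|h|h|h|h|h|h|h <;>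
      subst h <;> decide
  · have hA : pvGroupScan c pvLetterCalculations 0 = 0 := by
      apply pvScan_not_mem
      intro p hp hc
      exact h (by
        have hm : c ∈ (pvLetterCalculations.map Prod.snd).flatten :=
          List.mem_flatten.mpr ⟨p.2, List.mem_map.mpr ⟨p, hp, rfl⟩, hc⟩
        rwa [pvKeyList_eq_flatten] at hm)
    have hlow : ¬ (97 ≤ c.toNat ∧ c.toNat ≤ 122) := by
      rintro ⟨a, b⟩
      rcases pvRange_mem_keyList (by omega) b with hk | hg
      · exact h hk
      · omega
    have hup : ¬ (65 ≤ c.toNat ∧ c.toNat ≤ 90) := by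
      rintro ⟨a, b⟩
      rcases pvRange_mem_keyList a (by omega) with hk | hg
      · exact h hk
      · omega
    have hpunct : pvPunctScores.getD c 0 = 0 := by
      have hnone : pvPunctScores.get? c = none := by
        apply pvGet?_not_mem
        intro hmem
        simp only [List.map, List.mem_cons, List.not_mem_nil, or_false] at hmem
        rcases hmem with h9|h9|h9|h9|h9|h9|h9|h9|h9 <;> subst h9 <;>
          exact h (by decide)
      simp [PySem.Dict.getD, hnone]
    rw [hA, pvCharScoreB, if_neg hlow, if_neg hup, hpunct]

-- fold of A equals fold of B over any character list
theorem pvFold_eq (l : List Char) : ∀ (tA tB : Int), tA = tB →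
    l.foldl (fun total letter => pvGroupScan letter pvLetterCalculations total) tA
      = l.foldl (fun total c =>
          if 97 ≤ c.toNat ∧ c.toNat ≤ 122 then total + PySem.Int.mod ((c.toNat : Int) - 103) 16
          else if 65 ≤ c.toNat ∧ c.toNat ≤ 90 then total + PySem.Int.mod ((c.toNat : Int) - 61) 16
          else total + pvPunctScores.getD c 0) tB := by
  induction l with
  | nil => intro tA tB h; simpa using h
  | cons c rest ih =>
      intro tA tB h
      simp only [List.foldl]
      apply ih
      rw [pvGroupScan_acc, pvCharScore_eq, pvCharScoreB, h]
      split_ifs <;> rfl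

-- ===== VERDICT =====
theorem get_total_name_score_spec : Claim_equal_get_total_name_score := by
  intro name _
  unfold Spec_get_total_name_score get_total_name_score get_total_name_score_alt
  exact pvFold_eq _ 0 0 rfl
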